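-- pv_equiv track=rewrite | github.com/Cannasol-Tech/steves-mom-archive | scripts/detect_flaky_tests.py | analyze_pattern
-- ===== SOURCE A (Python) =====
-- from typing import Dict, List, Any, Tuple
--
-- def analyze_pattern(results: List[str]) -> str:
--     """Analyze the pattern of test results."""
--     if len(results) < 3:
--         return "insufficient_data"
--
--     # Check for alternating pattern
--     alternating = all(results[i] != results[i+1] for i in range(len(results)-1))
--     if alternating:
--         return "alternating"
--
--     # Check for recent degradation
--     recent_failures = sum(1 for r in results[-5:] if r in ['failed', 'error'])
--     if recent_failures >= 3:
--         return "recent_degradation"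
--
--     # Check for intermittent failures
--     failure_positions = [i for i, r in enumerate(results) if r in ['failed', 'error']]
--     if failure_positions:
--         gaps = [failure_positions[i+1] - failure_positions[i] for i in range(len(failure_positions)-1)]
--         if gaps and max(gaps) > 3:
--             return "intermittent"
--
--     return "inconsistent"
-- ===== SOURCE B (Python) =====
-- from typing import List
--
-- def _rle(xs):
--     """Run-length encoding: maximal runs of equal consecutive values."""
--     runs = []
--     i = 0
--     n = len(xs)
--     while i < n:
--         j = i + 1
--         while j < n and xs[j] == xs[i]:
--             j += 1
--         runs.append((xs[i], j - i))
--         i = j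
--     return runs
--
-- def analyze_pattern(results: List[str]) -> str:
--     """Classify via the run-length structure of the sequence."""
--     n = len(results)
--     if n < 3:
--         return "insufficient_data"
--     # alternating <=> no run longer than 1
--     if all(c == 1 for _, c in _rle(results)):
--         return "alternating"
--     is_fail = [r in ('failed', 'error') for r in results]
--     if sum(is_fail[max(0, n - 5):]) >= 3:
--         return "recent_degradation"
--     # a gap > 3 between consecutive failures <=> an interior False-run of length >= 3
--     fruns = _rle(is_fail)
--     for k in range(1, len(fruns) - 1):
--         val, cnt = fruns[k]
--         if not val and cnt >= 3:
--             return "intermittent"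
--     return "inconsistent"
-- ===== Notes on version B (the rewrite author's own statement) =====
-- stated objective: alternative
-- what changed: B classifies through run-length encoding instead of A's index arithmetic: alternating iff every run of equal consecutive results has length 1, and intermittent iff the RLE of the failure-indicator sequence contains an interior False-run of length >= 3 (equivalent to A's max gap > 3 between consecutive failure positions); only the last-5 failure count remains a direct count.
import Mathlib
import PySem

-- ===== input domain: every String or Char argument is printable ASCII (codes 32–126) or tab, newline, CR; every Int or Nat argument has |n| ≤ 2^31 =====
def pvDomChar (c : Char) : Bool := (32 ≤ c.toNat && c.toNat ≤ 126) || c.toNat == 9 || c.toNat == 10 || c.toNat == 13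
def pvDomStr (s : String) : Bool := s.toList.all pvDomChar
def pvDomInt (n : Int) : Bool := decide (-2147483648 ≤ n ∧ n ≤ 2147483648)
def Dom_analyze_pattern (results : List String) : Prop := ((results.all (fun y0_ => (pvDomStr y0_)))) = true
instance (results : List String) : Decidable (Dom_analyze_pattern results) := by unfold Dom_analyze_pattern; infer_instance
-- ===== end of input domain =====

-- B classifies via run-length encoding (alternating = all runs length 1; intermittent = interior False-run of length ≥ 3 in the failure-indicator RLE) instead of A's index-gap arithmetic; objective: alternative algorithm, same O(n) cost.

-- r in ['failed', 'error']  (the membership test both programs perform)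
def pvFails (r : String) : Bool := r == "failed" || r == "error"

-- ===== PORT A =====
def analyze_pattern (results : List String) : String :=
  if results.length < 3 then "insufficient_data" else
  -- all(results[i] != results[i+1] for i in range(len(results)-1))
  let alternating := (List.range (results.length - 1)).all
      (fun i => !(results.getD i "" == results.getD (i+1) ""))
  if alternating then "alternating" else
  -- sum(1 for r in results[-5:] if r in ['failed', 'error'])
  let recent_failures := ((PySem.List.slice results (some (-5)) none).filter pvFails).length
  if 3 ≤ recent_failures then "recent_degradation" else
  -- [i for i, r in enumerate(results) if r in ['failed', 'error']]
  let failure_positions := ((PySem.List.enumerate results 0).filter (fun p => pvFails p.2)).map (fun p => p.1)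
  if failure_positions.isEmpty then "inconsistent" else
  let gaps := (List.range (failure_positions.length - 1)).map
      (fun i => failure_positions.getD (i+1) 0 - failure_positions.getD i 0)
  match PySem.List.max? gaps (fun g => g) with
  | some m => if 3 < m then "intermittent" else "inconsistent"
  | none => "inconsistent"

-- ===== PORT B =====
-- _rle: the outer while loop is the recursion, the inner 'while xs[j]==xs[i]' is takeWhile/dropWhile (exact)
def pvRLE {α : Type} [BEq α] : List α → List (α × Nat)
  | [] => []
  | x :: xs =>
      (x, 1 + (xs.takeWhile (fun y => y == x)).length) :: pvRLE (xs.dropWhile (fun y => y == x))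
termination_by l => l.length
decreasing_by
  have := List.length_dropWhile_le (fun y => y == x) xs
  simp; omega

def analyze_pattern_alt (results : List String) : String :=
  if results.length < 3 then "insufficient_data" else
  -- all(c == 1 for _, c in _rle(results))
  if (pvRLE results).all (fun p => p.2 == 1) then "alternating" else
  -- is_fail = [r in ('failed','error') for r in results]
  let is_fail := results.map pvFails
  -- sum(is_fail[max(0, n-5):]) — Nat subtraction is Python's max(0, n-5)
  if 3 ≤ (is_fail.drop (results.length - 5)).countP (fun b => b) then "recent_degradation" else
  -- for k in range(1, len(fruns)-1): …  — the scanned indices are (fruns.drop 1).dropLast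
  let fruns := pvRLE is_fail
  if ((fruns.drop 1).dropLast).any (fun p => !p.1 && decide (3 ≤ p.2)) then "intermittent"
  else "inconsistent"

-- ===== PRECONDITION & SPEC =====
def Spec_analyze_pattern (results : List String) (out : String) : Prop := out = analyze_pattern_alt results
instance (results : List String) (out : String) : Decidable (Spec_analyze_pattern results out) := by unfold Spec_analyze_pattern; infer_instance

-- ===== CLAIM (what is proved, stated in full; the proofs are below) =====
def Claim_equal_analyze_pattern : Prop := ∀ (results : List String), Dom_analyze_pattern results → Spec_analyze_pattern results (analyze_pattern results)

-- ===== LEMMAS AND PROOFS =====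

-- specification shapes
def pvHasEq (p : Option String) : List String → Bool
  | [] => false
  | r :: rs => (p == some r) || pvHasEq (some r) rs

def pvPosF (k : Int) : List String → List Int
  | [] => []
  | r :: rs => (if pvFails r then [k] else []) ++ pvPosF (k+1) rs

-- canonical form both ports are reduced to
def pvClassify (rs : List String) : String :=
  if rs.length < 3 then "insufficient_data"
  else if pvHasEq none rs = false then "alternating"
  else if 3 ≤ (pvPosF 0 rs).countP (fun i => decide ((rs.length : Int) - 5 ≤ i)) then "recent_degradation"
  else if ∃ p ∈ (pvPosF 0 rs).zip (pvPosF 0 rs).tail, 3 < p.2 - p.1 then "intermittent"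
  else "inconsistent"

-- ========== A-side lemmas ==========

theorem pvAlt_aux (rs : List String) : ∀ (x : String),
    (List.range rs.length).all (fun i => !((x :: rs).getD i "" == (x :: rs).getD (i+1) ""))
      = !pvHasEq (some x) rs := by
  induction rs with
  | nil => intro x; simp [pvHasEq]
  | cons y t ih =>
      intro x
      rw [List.length_cons, List.range_succ_eq_map]
      simp only [List.all_cons, List.all_map, pvHasEq]
      have : ((List.range t.length).all fun i =>
          !((x :: y :: t).getD (i+1) "" == (x :: y :: t).getD (i+1+1) "")) =
          !pvHasEq (some y) t := by
        rw [← ih y]; rfl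
      simp only [Function.comp_def]
      rw [this]
      simp [List.getD]

theorem pvAlternating_eq (rs : List String) :
    (List.range (rs.length - 1)).all (fun i => !(rs.getD i "" == rs.getD (i+1) ""))
      = !pvHasEq none rs := by
  cases rs with
  | nil => simp [pvHasEq]
  | cons x rs =>
      have := pvAlt_aux rs x
      simpa [pvHasEq] using this

theorem pvRecent_eq (rs : List String) : ∀ (k c : Int),
    (pvPosF k rs).countP (fun i => decide (c ≤ i))
      = ((rs.drop (c - k).toNat).filter pvFails).length := by
  induction rs with
  | nil => intro k c; simp [pvPosF]
  | cons r rs ih =>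
      intro k c
      simp only [pvPosF, List.countP_append]
      by_cases hck : c ≤ k
      · have h0 : (c - k).toNat = 0 := by omega
        have h0' : (c - (k+1)).toNat = 0 := by omega
        rw [h0]
        simp only [List.drop_zero] at *
        rw [ih (k+1) c, h0']
        simp only [List.drop_zero]
        by_cases hf : pvFails r = true <;> simp [hf, hck, List.filter_cons] <;> omega
      · have h1 : (c - k).toNat = (c - (k+1)).toNat + 1 := by omega
        rw [h1]
        simp only [List.drop_succ_cons]
        rw [← ih (k+1) c]
        by_cases hf : pvFails r = true
        · simp [hf, List.countP_cons, hck]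
        · simp [hf]

theorem pvPositions_eq (rs : List String) : ∀ (k : Int),
    ((PySem.List.enumerate rs k).filter (fun p => pvFails p.2)).map (fun p => p.1)
      = pvPosF k rs := by
  induction rs with
  | nil => intro k; simp [PySem.List.enumerate_nil, pvPosF]
  | cons r rs ih =>
      intro k
      rw [PySem.List.enumerate_cons]
      by_cases hf : pvFails r = true
      · simp [List.filter_cons, hf, pvPosF, ih]
      · simp [List.filter_cons, hf, pvPosF, ih]

theorem pvGaps_eq (pos : List Int) :
    (List.range (pos.length - 1)).map (fun i => pos.getD (i+1) 0 - pos.getD i 0)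
      = (pos.zip pos.tail).map (fun p => p.2 - p.1) := by
  induction pos with
  | nil => simp
  | cons x pos ih =>
      cases pos with
      | nil => simp
      | cons y t =>
          rw [List.length_cons, List.length_cons]
          simp only [Nat.add_sub_cancel]
          rw [List.range_succ_eq_map]
          simp only [List.map_cons, List.map_map]
          have h2 : ((List.range ((y :: t).length - 1)).map
              (fun i => (y :: t).getD (i+1) 0 - (y :: t).getD i 0))
              = ((y :: t).zip (y :: t).tail).map (fun p => p.2 - p.1) := ih
          simp only [List.length_cons, Nat.add_sub_cancel] at h2
          simp only [List.zip, List.tail_cons, List.zipWith_cons_cons, List.map_cons]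
          simp only [List.zip, List.tail_cons] at h2
          refine congrArg₂ List.cons (by simp [List.getD]) ?_
          rw [← h2]
          apply List.map_congr_left
          intro i _
          simp [Function.comp, List.getD]

theorem pvClamp5 (n : Nat) : PySem.List.clampIdx n (-5) = ((n : Int) - 5).toNat := by
  simp only [PySem.List.clampIdx]
  split_ifs <;> omega

theorem pvA_eq (rs : List String) : analyze_pattern rs = pvClassify rs := by
  simp only [analyze_pattern, pvClassify]
  by_cases hlen : rs.length < 3
  · rw [if_pos hlen, if_pos hlen]
  rw [if_neg hlen, if_neg hlen]
  rw [pvAlternating_eq]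
  by_cases hh : pvHasEq none rs = false
  · rw [if_pos (by simp [hh]), if_pos hh]
  rw [if_neg (by simp at hh ⊢; simp [hh]), if_neg hh]
  have hrecent : ((PySem.List.slice rs (some (-5)) none).filter pvFails).length
      = (pvPosF 0 rs).countP (fun i => decide ((rs.length : Int) - 5 ≤ i)) := by
    rw [PySem.List.slice_some_none, pvClamp5, pvRecent_eq rs 0 ((rs.length : Int) - 5)]
    norm_num
  rw [hrecent]
  by_cases hrec : 3 ≤ (pvPosF 0 rs).countP (fun i => decide ((rs.length : Int) - 5 ≤ i))
  · rw [if_pos hrec, if_pos hrec]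
  rw [if_neg hrec, if_neg hrec]
  rw [pvPositions_eq rs 0, pvGaps_eq (pvPosF 0 rs)]
  by_cases hpe : (pvPosF 0 rs).isEmpty
  · rw [if_pos hpe]
    have hpnil : pvPosF 0 rs = [] := List.isEmpty_iff.mp hpe
    rw [if_neg (by rw [hpnil]; rintro ⟨p, hp, -⟩; simp at hp)]
  rw [if_neg hpe]
  cases hmax : PySem.List.max? ((pvPosF 0 rs).zip (pvPosF 0 rs).tail |>.map fun p => p.2 - p.1) (fun g => g) with
  | none =>
      have hznil : (pvPosF 0 rs).zip (pvPosF 0 rs).tail = [] :=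
        List.map_eq_nil_iff.mp ((PySem.List.max?_eq_none_iff _ _).mp hmax)
      rw [if_neg (by rw [hznil]; rintro ⟨p, hp, -⟩; simp at hp)]
  | some m =>
      have hmm := PySem.List.max?_mem hmax
      have hub := PySem.List.max?_isMax hmax
      by_cases h3 : 3 < m
      · obtain ⟨p, hp, hpm⟩ := List.mem_map.mp hmm
        rw [if_pos (⟨p, hp, by omega⟩ : ∃ p ∈ (pvPosF 0 rs).zip (pvPosF 0 rs).tail, 3 < p.2 - p.1)]
        simp [h3]
      · rw [if_neg ?hne]
        case hne =>
          rintro ⟨p, hp, hp3⟩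
          exact h3 (by have := hub _ (List.mem_map_of_mem hp); simp at this; omega)
        simp [h3]

-- ========== B-side lemmas ==========

-- positions of true in a boolean list, starting at offset k
def pvPosB (k : Int) : List Bool → List Int
  | [] => []
  | true :: bs => k :: pvPosB (k+1) bs
  | false :: bs => pvPosB (k+1) bs

theorem pvPosF_map (rs : List String) : ∀ k, pvPosF k rs = pvPosB k (rs.map pvFails) := by
  induction rs with
  | nil => intro k; simp [pvPosF, pvPosB]
  | cons r t ih =>
      intro k
      by_cases h : pvFails r = true
      · simp [pvPosF, pvPosB, h, ih]
      · simp only [Bool.not_eq_true] at h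
        simp [pvPosF, pvPosB, h, ih]

theorem pvPosB_shift (bs : List Bool) : ∀ (k : Int),
    pvPosB k bs = (pvPosB 0 bs).map (fun i => i + k) := by
  induction bs with
  | nil => intro k; simp [pvPosB]
  | cons b t ih =>
      intro k
      cases b with
      | true =>
          simp only [pvPosB, List.map_cons, zero_add]
          rw [ih (k+1), ih 1, List.map_map]
          refine congrArg₂ List.cons (by ring) ?_
          apply List.map_congr_left
          intro i _
          simp only [Function.comp_apply]
          ring
      | false =>
          simp only [pvPosB, zero_add]
          rw [ih (k+1), ih 1, List.map_map]
          apply List.map_congr_left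
          intro i _
          simp only [Function.comp_apply]
          ring

-- "some gap between consecutive elements exceeds 3"
def pvG (L : List Int) : Prop := ∃ p ∈ L.zip L.tail, 3 < p.2 - p.1

theorem pvG_map (L : List Int) (j : Int) : pvG (L.map (fun i => i + j)) ↔ pvG L := by
  unfold pvG
  rw [← List.map_tail, List.zip_map]
  constructor
  · rintro ⟨p, hp, h3⟩
    obtain ⟨q, hq, rfl⟩ := List.mem_map.mp hp
    exact ⟨q, hq, by simp [Prod.map] at h3 ⊢; omega⟩
  · rintro ⟨q, hq, h3⟩
    exact ⟨Prod.map (fun i => i + j) (fun i => i + j) q, List.mem_map.mpr ⟨q, hq, rfl⟩,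
      by simp [Prod.map]; omega⟩

theorem pvG_nil : ¬ pvG [] := by rintro ⟨p, hp, -⟩; simp at hp

theorem pvG_single (a : Int) : ¬ pvG [a] := by rintro ⟨p, hp, -⟩; simp at hp

theorem pvG_cons_cons (a b : Int) (R : List Int) :
    pvG (a :: b :: R) ↔ 3 < b - a ∨ pvG (b :: R) := by
  unfold pvG
  simp only [List.tail_cons, List.zip_cons_cons, List.mem_cons]
  constructor
  · rintro ⟨p, (rfl | hp), h3⟩
    · exact Or.inl h3
    · exact Or.inr ⟨p, hp, h3⟩
  · rintro (h | ⟨p, hp, h3⟩)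
    · exact ⟨(a, b), Or.inl rfl, h⟩
    · exact ⟨p, Or.inr hp, h3⟩

-- scanner: after a true was seen, cnt falses ago
def pvAfter (cnt : Nat) : List Bool → Bool
  | [] => false
  | true :: bs => decide (3 ≤ cnt) || pvAfter 0 bs
  | false :: bs => pvAfter (cnt + 1) bs

def pvGapB : List Bool → Bool
  | [] => false
  | true :: bs => pvAfter 0 bs
  | false :: bs => pvGapB bs

theorem pvAfter_iff (bs : List Bool) : ∀ (cnt : Nat),
    pvAfter cnt bs = true ↔ pvG ((-(cnt + 1) : Int) :: pvPosB 0 bs) := by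
  induction bs with
  | nil =>
      intro cnt
      simp only [pvAfter, pvPosB]
      constructor
      · intro h; simp at h
      · intro h; exact absurd h (pvG_single _)
  | cons b t ih =>
      intro cnt
      cases b with
      | true =>
          simp only [pvAfter, pvPosB, zero_add]
          rw [pvPosB_shift t 1, pvG_cons_cons]
          have h0 : (0 : Int) :: (pvPosB 0 t).map (fun i => i + 1)
              = ((-1 : Int) :: pvPosB 0 t).map (fun i => i + 1) := by simp
          rw [h0, pvG_map]
          have i0 := ih 0
          norm_num at i0
          rw [Bool.or_eq_true, decide_eq_true_iff, i0]
          constructor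
          · rintro (h | h)
            · left; omega
            · right; exact h
          · rintro (h | h)
            · left; omega
            · right; exact h
      | false =>
          simp only [pvAfter, pvPosB, zero_add]
          rw [pvPosB_shift t 1]
          have hmap : (-(↑cnt + 1) : Int) :: (pvPosB 0 t).map (fun i => i + 1)
              = ((-(↑cnt + 1) - 1 : Int) :: pvPosB 0 t).map (fun i => i + 1) := by
            have hh : (-(↑cnt + 1) : Int) = (-(↑cnt + 1) - 1) + 1 := by ring
            rw [List.map_cons]
            exact congrArg₂ List.cons hh rfl
          rw [hmap, pvG_map]
          have i1 := ih (cnt + 1)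
          have hc : (-(↑(cnt + 1) + 1) : Int) = -(↑cnt + 1) - 1 := by push_cast; ring
          rw [hc] at i1
          exact i1

theorem pvGapB_iff (bs : List Bool) : pvGapB bs = true ↔ pvG (pvPosB 0 bs) := by
  induction bs with
  | nil =>
      simp only [pvGapB, pvPosB]
      constructor
      · intro h; simp at h
      · intro h; exact absurd h pvG_nil
  | cons b t ih =>
      cases b with
      | true =>
          simp only [pvGapB, pvPosB, zero_add]
          rw [pvPosB_shift t 1]
          have h0 : (0 : Int) :: (pvPosB 0 t).map (fun i => i + 1)
              = ((-1 : Int) :: pvPosB 0 t).map (fun i => i + 1) := by simp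
          rw [h0, pvG_map]
          have i0 := pvAfter_iff t 0
          norm_num at i0
          exact i0
      | false =>
          simp only [pvGapB, pvPosB, zero_add]
          rw [pvPosB_shift t 1, pvG_map]
          exact ih

-- helper facts about runs
theorem pvAfter_trues (u : List Bool) (hu : ∀ x ∈ u, x = true) (l : List Bool) :
    pvAfter 0 (u ++ l) = pvAfter 0 l := by
  induction u with
  | nil => rfl
  | cons x t ih =>
      have hx : x = true := hu x (by simp)
      subst hx
      simp only [List.cons_append, pvAfter]
      rw [ih (fun y hy => hu y (by simp [hy]))]
      simp

theorem pvAfter_falses (u : List Bool) (hu : ∀ x ∈ u, x = false) (l : List Bool) :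
    ∀ k, pvAfter k (u ++ l) = pvAfter (k + u.length) l := by
  induction u with
  | nil => intro k; simp
  | cons x t ih =>
      intro k
      have hx : x = false := hu x (by simp)
      subst hx
      simp only [List.cons_append, pvAfter]
      rw [ih (fun y hy => hu y (by simp [hy])) (k + 1)]
      congr 1
      simp only [List.length_cons]
      omega

theorem pvGapB_falses (u : List Bool) (hu : ∀ x ∈ u, x = false) (l : List Bool) :
    pvGapB (u ++ l) = pvGapB l := by
  induction u with
  | nil => rfl
  | cons x t ih =>
      have hx : x = false := hu x (by simp)
      subst hx
      simp only [List.cons_append, pvGapB]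
      exact ih (fun y hy => hu y (by simp [hy]))

def pvBad (p : Bool × Nat) : Bool := !p.1 && decide (3 ≤ p.2)

theorem pvJ_cons (r : Bool × Nat) (rest : List (Bool × Nat)) (hr : pvBad r = false) :
    ((r :: rest).dropLast).any pvBad = rest.dropLast.any pvBad := by
  cases rest with
  | nil => simp
  | cons s t => simp [List.dropLast_cons₂, hr]

-- the key run lemma: the gap scanner equals "some non-final false run of length ≥ 3"
theorem pvAfter_runs (bs : List Bool) : pvAfter 0 bs = ((pvRLE bs).dropLast).any pvBad := by
  induction bs using pvRLE.induct with
  | case1 => simp [pvAfter, pvRLE]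
  | case2 x t ih =>
      rw [pvRLE]
      have hsplit : t = t.takeWhile (fun y => y == x) ++ t.dropWhile (fun y => y == x) :=
        (List.takeWhile_append_dropWhile).symm
      cases x with
      | true =>
          have htw : ∀ y ∈ t.takeWhile (fun y => y == true), y = true := by
            intro y hy
            have := List.mem_takeWhile_imp hy
            simpa using this
          have h1 : pvAfter 0 (true :: t) = pvAfter 0 (t.dropWhile (fun y => y == true)) := by
            simp only [pvAfter]
            conv_lhs => rw [hsplit]
            rw [pvAfter_trues _ htw]
            simp
          rw [h1, ih, pvJ_cons _ _ (by simp [pvBad])]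
      | false =>
          have htw : ∀ y ∈ t.takeWhile (fun y => y == false), y = false := by
            intro y hy
            have := List.mem_takeWhile_imp hy
            simpa using this
          set d := t.dropWhile (fun y => y == false) with hd
          have hc : pvAfter 0 (false :: t)
              = pvAfter (1 + (t.takeWhile (fun y => y == false)).length) d := by
            simp only [pvAfter]
            conv_lhs => rw [hsplit]
            rw [pvAfter_falses _ htw d 1]
          rw [hc]
          -- d = [] or starts with true
          cases hdc : d with
          | nil =>
              rw [hdc] at *
              simp [pvAfter, pvRLE]
          | cons y u =>
              have hy : y = true := by
                have hh := List.head?_dropWhile_not (fun y => y == false) t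
                rw [← hd, hdc] at hh
                simp at hh
                simpa using hh
              subst hy
              rw [hdc] at ih
              have hrle : pvRLE (true :: u) =
                  (true, 1 + (u.takeWhile (fun y => y == true)).length)
                    :: pvRLE (u.dropWhile (fun y => y == true)) := by rw [pvRLE]
              have hdl : (((false, 1 + (t.takeWhile (fun y => y == false)).length)
                    :: pvRLE (true :: u)).dropLast).any pvBad
                  = (pvBad (false, 1 + (t.takeWhile (fun y => y == false)).length)
                    || ((pvRLE (true :: u)).dropLast).any pvBad) := by
                rw [hrle]
                simp [List.dropLast_cons₂]
              rw [hdl, ← ih]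
              simp [pvAfter, pvBad]
  termination_by bs.length
  decreasing_by
    have := List.length_dropWhile_le (fun y => y == x) t
    simp
    omega

theorem pvGapB_runs (bs : List Bool) :
    (((pvRLE bs).drop 1).dropLast).any pvBad = pvGapB bs := by
  cases bs with
  | nil => simp [pvRLE, pvGapB]
  | cons b t =>
      rw [pvRLE]
      simp only [List.drop_one, List.tail_cons]
      have hsplit : t = t.takeWhile (fun y => y == b) ++ t.dropWhile (fun y => y == b) :=
        (List.takeWhile_append_dropWhile).symm
      rw [← pvAfter_runs]
      cases b with
      | true =>
          have htw : ∀ y ∈ t.takeWhile (fun y => y == true), y = true := by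
            intro y hy
            have := List.mem_takeWhile_imp hy
            simpa using this
          simp only [pvGapB]
          conv_rhs => rw [hsplit]
          rw [pvAfter_trues _ htw]
      | false =>
          have htw : ∀ y ∈ t.takeWhile (fun y => y == false), y = false := by
            intro y hy
            have := List.mem_takeWhile_imp hy
            simpa using this
          simp only [pvGapB]
          conv_rhs => rw [hsplit]
          rw [pvGapB_falses _ htw]
          set d := t.dropWhile (fun y => y == false) with hd
          cases hdc : d with
          | nil => simp [pvGapB, pvAfter]
          | cons y u =>
              have hy : y = true := by
                have hh := List.head?_dropWhile_not (fun y => y == false) t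
                rw [← hd, hdc] at hh
                simp at hh
                simpa using hh
              subst hy
              simp [pvGapB, pvAfter]

-- alternating: every run has length 1 iff no equal adjacent pair
theorem pvHasEq_head (x : String) (t : List String)
    (h : t = [] ∨ ∃ y u, t = y :: u ∧ (y == x) = false) :
    pvHasEq (some x) t = pvHasEq none t := by
  rcases h with rfl | ⟨y, u, rfl, hy⟩
  · rfl
  · have hxy : (x == y) = false := by
      rw [beq_eq_false_iff_ne] at hy ⊢
      exact fun h => hy h.symm
    simp [pvHasEq, hxy]

theorem pvRLE_all_one (rs : List String) :
    (pvRLE rs).all (fun p => p.2 == 1) = !pvHasEq none rs := by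
  induction rs using pvRLE.induct with
  | case1 => simp [pvRLE, pvHasEq]
  | case2 x t ih =>
      rw [pvRLE]
      cases htw : t.takeWhile (fun y => y == x) with
      | nil =>
          have hdw : t.dropWhile (fun y => y == x) = t := by
            cases t with
            | nil => rfl
            | cons y u =>
                have hy : ¬ ((y == x) = true) := by
                  intro hy
                  simp [List.takeWhile_cons, hy] at htw
                rw [List.dropWhile_cons]
                simp [hy]
          rw [hdw] at ih
          have hhead : t = [] ∨ ∃ y u, t = y :: u ∧ (y == x) = false := by
            cases t with
            | nil => exact Or.inl rfl
            | cons y u =>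
                refine Or.inr ⟨y, u, rfl, ?_⟩
                by_contra hy
                simp only [Bool.not_eq_false] at hy
                simp [List.takeWhile_cons, hy] at htw
          simp only [htw, List.length_nil, List.all_cons]
          rw [hdw, ih]
          have h1 : pvHasEq none (x :: t) = pvHasEq (some x) t := by simp [pvHasEq]
          rw [h1, pvHasEq_head x t hhead]
          simp
      | cons y u =>
          have hty : ∃ v, t = y :: v := by
            cases t with
            | nil => simp [List.takeWhile_nil] at htw
            | cons z w =>
                rw [List.takeWhile_cons] at htw
                by_cases hz : (z == x) = true
                · rw [if_pos hz] at htw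
                  injection htw with h1 h2
                  exact ⟨w, by rw [h1]⟩
                · rw [if_neg hz] at htw
                  exact absurd htw (by simp)
          obtain ⟨v, rfl⟩ := hty
          have hyx : (y == x) = true := by
            rw [List.takeWhile_cons] at htw
            by_cases hz : (y == x) = true
            · exact hz
            · rw [if_neg hz] at htw
              exact absurd htw (by simp)
          have hx : y = x := by simpa using hyx
          subst hx
          simp only [htw, List.length_cons, List.all_cons]
          have hne : (1 + (u.length + 1) == 1) = false := by simp
          rw [hne]
          have h1 : pvHasEq none (y :: y :: v) = true := by simp [pvHasEq]
          rw [h1]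
          simp

-- recent failures via the boolean list
theorem pvRecentB_eq (rs : List String) :
    ((rs.map pvFails).drop (rs.length - 5)).countP (fun b => b)
      = (pvPosF 0 rs).countP (fun i => decide ((rs.length : Int) - 5 ≤ i)) := by
  rw [pvRecent_eq rs 0 ((rs.length : Int) - 5)]
  rw [← List.map_drop, List.countP_map]
  rw [← List.countP_eq_length_filter]
  have h5 : ((rs.length : Int) - 5 - 0).toNat = rs.length - 5 := by omega
  rw [h5]
  rfl

theorem pvB_eq (rs : List String) : analyze_pattern_alt rs = pvClassify rs := by
  simp only [analyze_pattern_alt, pvClassify]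
  by_cases hlen : rs.length < 3
  · rw [if_pos hlen, if_pos hlen]
  rw [if_neg hlen, if_neg hlen]
  rw [pvRLE_all_one]
  by_cases hh : pvHasEq none rs = false
  · rw [if_pos (by simp [hh]), if_pos hh]
  rw [if_neg (by simp at hh ⊢; simp [hh]), if_neg hh]
  rw [pvRecentB_eq]
  by_cases hrec : 3 ≤ (pvPosF 0 rs).countP (fun i => decide ((rs.length : Int) - 5 ≤ i))
  · rw [if_pos hrec, if_pos hrec]
  rw [if_neg hrec, if_neg hrec]
  have hint : (((pvRLE (rs.map pvFails)).drop 1).dropLast).any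
        (fun p => !p.1 && decide (3 ≤ p.2))
      = pvGapB (rs.map pvFails) := pvGapB_runs (rs.map pvFails)
  rw [hint]
  have hiff : pvGapB (rs.map pvFails) = true
      ↔ ∃ p ∈ (pvPosF 0 rs).zip (pvPosF 0 rs).tail, 3 < p.2 - p.1 := by
    rw [pvGapB_iff, ← pvPosF_map rs 0]
    rfl
  by_cases hg : pvGapB (rs.map pvFails) = true
  · rw [if_pos hg, if_pos (hiff.mp hg)]
  · rw [if_neg hg, if_neg (fun h => hg (hiff.mpr h))]

-- ===== VERDICT (by name: the statement is the Claim_ definition above) =====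
theorem analyze_pattern_spec : Claim_equal_analyze_pattern := by
  intro results _
  unfold Spec_analyze_pattern
  rw [pvA_eq, pvB_eq]
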